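-- pv_equiv track=rewrite | github.com/Michael-Senkao/Competitive-Programming | LeetCode/2179-most-beautiful-item-for-each-query/most-beautiful-item-for-each-query.py | search
-- ===== SOURCE A (Python) =====
-- def search(target,max_beauties):
--     left = 0
--     right = len(max_beauties)-1
--     res = 0
--     while left <= right:
--         mid = left + (right-left)//2
--         if max_beauties[mid][0] <= target:
--             res = max_beauties[mid][1]
--             left = mid+1
--         else:
--             right = mid-1
--     return res
-- ===== SOURCE B (Python) =====
-- def search(target, max_beauties):
--     def helper(lo, hi, res):
--         if lo > hi:
--             return res
--         mid = lo + (hi - lo) // 2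
--         if max_beauties[mid][0] <= target:
--             return helper(mid + 1, hi, max_beauties[mid][1])
--         return helper(lo, mid - 1, res)
--     return helper(0, len(max_beauties) - 1, 0)
-- ===== Notes on version B (the rewrite author's own statement) =====
-- stated objective: alternative
-- what changed: The imperative while-loop binary search with mutable left/right/res state is re-decomposed as a recursive divide-and-conquer helper(lo, hi, res) that threads the best-so-far beauty as an accumulator and returns it at the base case.
import Mathlib
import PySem

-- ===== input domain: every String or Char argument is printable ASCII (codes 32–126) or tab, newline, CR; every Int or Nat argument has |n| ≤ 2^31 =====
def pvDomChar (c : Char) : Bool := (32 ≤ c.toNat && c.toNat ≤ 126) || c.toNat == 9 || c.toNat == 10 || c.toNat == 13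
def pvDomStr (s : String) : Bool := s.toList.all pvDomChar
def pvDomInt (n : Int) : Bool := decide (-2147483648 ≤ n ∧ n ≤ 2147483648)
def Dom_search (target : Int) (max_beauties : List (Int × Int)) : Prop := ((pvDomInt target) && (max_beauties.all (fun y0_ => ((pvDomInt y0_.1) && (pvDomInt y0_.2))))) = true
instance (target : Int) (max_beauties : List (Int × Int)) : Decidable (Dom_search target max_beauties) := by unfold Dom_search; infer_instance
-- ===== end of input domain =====

-- B re-decomposes A's imperative while-loop binary search as a recursive
-- divide-and-conquer helper threading the best-so-far beauty as an accumulator;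
-- identical probes and result (objective: alternative decomposition).


-- ===== PORT A =====
-- A's while-loop, transliterated as a fuel-indexed loop over the mutable state
-- (left, right, res); fuel = len+1 strictly exceeds the number of iterations
-- (the interval right-left+1 strictly shrinks each pass).  The index access
-- max_beauties[mid] is PySem.List.pyGet?; the `none` case is unreachable from
-- `search`'s initial state (0 ≤ mid ≤ len-1 always holds there).
def searchLoop (target : Int) (max_beauties : List (Int × Int)) :
    Nat → Int → Int → Int → Int
  | 0, _, _, res => res
  | fuel + 1, left, right, res =>
    if left ≤ right then
      let mid := left + PySem.Int.floordiv (right - left) 2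
      match PySem.List.pyGet? max_beauties mid with
      | some item =>
          if item.1 ≤ target then
            searchLoop target max_beauties fuel (mid + 1) right item.2
          else
            searchLoop target max_beauties fuel left (mid - 1) res
      | none => res   -- Python raises IndexError here; unreachable from `search`
    else res

def search (target : Int) (max_beauties : List (Int × Int)) : Int :=
  searchLoop target max_beauties (max_beauties.length + 1) 0 ((max_beauties.length : Int) - 1) 0

-- ===== PORT B =====
-- B's recursive helper(lo, hi, res): divide and conquer on the interval.
def searchHelper (target : Int) (max_beauties : List (Int × Int))
    (lo hi res : Int) : Int :=
  if _h : lo > hi then res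
  else
    let mid := lo + PySem.Int.floordiv (hi - lo) 2
    match PySem.List.pyGet? max_beauties mid with
    | some item =>
        if item.1 ≤ target then
          searchHelper target max_beauties (mid + 1) hi item.2
        else
          searchHelper target max_beauties lo (mid - 1) res
    | none => res   -- unreachable from `search_alt`'s initial call
  termination_by (hi - lo + 1).toNat
  decreasing_by
  · have := (PySem.Int.floordiv_eq_ediv_of_pos (a := hi - lo) (by omega : (0:Int) < 2))
    simp only [this]; omega
  · have := (PySem.Int.floordiv_eq_ediv_of_pos (a := hi - lo) (by omega : (0:Int) < 2))
    simp only [this]; omega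

def search_alt (target : Int) (max_beauties : List (Int × Int)) : Int :=
  searchHelper target max_beauties 0 ((max_beauties.length : Int) - 1) 0

-- ===== PRECONDITION & SPEC =====
def Spec_search (target : Int) (max_beauties : List (Int × Int)) (out : Int) : Prop := out = search_alt target max_beauties
instance (target : Int) (max_beauties : List (Int × Int)) (out : Int) : Decidable (Spec_search target max_beauties out) := by unfold Spec_search; infer_instance

-- ===== CLAIM (what is proved, stated in full; the proofs are below) =====
def Claim_equal_search : Prop := ∀ (target : Int) (max_beauties : List (Int × Int)), Dom_search target max_beauties → Spec_search target max_beauties (search target max_beauties)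

-- ===== LEMMAS AND PROOFS =====

-- With enough fuel, one A-loop pass equals one B-recursion step, for every state.
theorem searchLoop_eq_helper (target : Int) (max_beauties : List (Int × Int)) :
    ∀ (fuel : Nat) (lo hi res : Int), (hi - lo + 1).toNat < fuel →
      searchLoop target max_beauties fuel lo hi res
        = searchHelper target max_beauties lo hi res := by
  intro fuel
  induction fuel with
  | zero => intro lo hi res h; omega
  | succ n ih =>
    intro lo hi res h
    rw [searchLoop, searchHelper]
    by_cases hlr : lo ≤ hi
    · have hmid := (PySem.Int.floordiv_eq_ediv_of_pos (a := hi - lo) (by omega : (0:Int) < 2))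
      simp only [hlr, if_true, dif_neg (by omega : ¬ lo > hi)]
      cases PySem.List.pyGet? max_beauties (lo + PySem.Int.floordiv (hi - lo) 2) with
      | none => rfl
      | some item =>
        by_cases ht : item.1 ≤ target
        · simp only [ht, if_true]
          exact ih _ _ _ (by rw [hmid] at *; omega)
        · simp only [ht, if_false]
          exact ih _ _ _ (by rw [hmid] at *; omega)
    · simp [hlr, dif_pos (by omega : lo > hi)]

-- ===== VERDICT (by name: the statement is the Claim_ definition above) =====
theorem search_spec : Claim_equal_search := by
  intro target mb _
  unfold Spec_search search search_alt
  exact searchLoop_eq_helper target mb _ 0 _ 0 (by omega)
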